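/- GENERATED by mk_final_copies.py from the proof of the farm's unit `compute_sorted_huffman.1` (farm:compute_sorted_huffman.1.1: Proof.lean) as the
   re-elaboration sweep compiled it — do not edit. -/
/-
  compute_sorted_huffman.1 (CONTRACTS 90; stb_vorbis_fixed.c:1207-1221; 10B1E0H - 10B322H, 78 instructions, 12 check sites):
  the prologue (six pushes, `sub rsp, 38H`, `rbp := c`, `lengths` and `values` spilled), the dispatch on `c->sparse`, then

      dense   (10B2AEH, loop head 10B21DH = `L.compute_sorted_huffman.loop1`, line 1215)
              for (i = 0; i < c->entries; ++i) if (include_in_sort(c, lengths[i])) c->sorted_codewords[k++] = bit_reverse(c->codewords[i]);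
      sparse  (10B20EH, loop head 10B30FH = `L.compute_sorted_huffman.loop2`, line 1220)
              for (i = 0; i < c->sorted_entries; ++i) c->sorted_codewords[i] = bit_reverse(c->codewords[i]);

  both left at 10B324H (`L.compute_sorted_huffman.cut6`) with the exit assertion `SortedHuffman.AtSort`.

  THE LOOP INVARIANT of both loops (`u` the entry state, `s` the state at the head; the ghost numbers `E SE CW SC SPb` are the
  fields entries, sorted_entries, codewords, sorted_codewords, sparse of `*c` in the ENTRY memory, `Nums` of Lemmas.lean):
      rbp = c, rsp = u.rsp - 104, the code span                                           (the walker's `w_rbp w_rsp w_eq`)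
      r12 = i, `i <= E` (dense) / `i <= SE` (sparse); dense: r14 = k = longCount u.mem lengths i   (CNT': `k < SE` at the store)
      hsame : the memory changed only inside the own frame `[u.rsp - 336, u.rsp)` and inside `sorted_codewords[0 .. se]`
      hun   : no shadow byte written;   hs0 .. hs8 : the return address, the six saved registers, the two spilled arguments
      hdf, hmx : DF = 0, the MXCSR masks;   w_kept widened to everything a callee may clobber
  Every field of `*c` the body loads is read through `hsame` (`read_book`), the byte `lengths[i]` through `read_len`: the
  stores go into `sorted_codewords` only, which the precondition's `Apart` keeps off the struct and off `lengths`.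
  MEASURES: `E - i`, `SE - i`. At the exit `common_exit` (Lemmas.lean) builds `SortedHuffman.Common` from the invariant.
-/
import Asan.CheckWalk
import Vorbis.Spec.Units.compute_sorted_huffman_1
import Vorbis.Spec.Worked.compute_sorted_huffman_1_Lemmas

open X86 X86.User Asan Vorbis Vorbis.Spec
open Vorbis.Spec.compute_sorted_huffman_1

set_option maxRecDepth 4000
set_option maxHeartbeats 32000000

/-- Segment 1 of `compute_sorted_huffman`: from the function's entry with the full precondition to the cut point 10B324H
(before the qsort) with `SortedHuffman.AtSort`, through loop 1215 (dense book: CNT' bounds the store index `k`) or loop 1220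
(sparse book). -/
theorem Vorbis.Spec.Worked.compute_sorted_huffman_1_ok : Vorbis.Spec.compute_sorted_huffman_1.Statement := by
  intro Lay hLay μ hμ u₀ hcode hload1 hload4 h_iis hload8 h_br hstore4 others frames Blk ret u he hpre
  have he0 := he
  v_entry he
  have hiis := h_iis others frames
  have hbr := h_br others frames
  have hsh := hpre.shadow
  have hsp := hsh.rsp
  -- ghost numbers: the fields of `*c` in the entry memory, named BEFORE the walk (each is a rewrite rule of every load)
  obtain ⟨E, hE⟩ : ∃ E : Nat, u.mem.readLE (u.reg .rdi + 4) 4 = E := ⟨_, rfl⟩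
  obtain ⟨SE, hSE⟩ : ∃ SE : Nat, u.mem.readLE (u.reg .rdi + 2112) 4 = SE := ⟨_, rfl⟩
  obtain ⟨CW, hCW⟩ : ∃ CW : Nat, u.mem.readLE (u.reg .rdi + 40) 8 = CW := ⟨_, rfl⟩
  obtain ⟨SC, hSC⟩ : ∃ SC : Nat, u.mem.readLE (u.reg .rdi + 2096) 8 = SC := ⟨_, rfl⟩
  obtain ⟨SPb, hSPb⟩ : ∃ SPb : Nat, u.mem.readLE (u.reg .rdi + 27) 1 = SPb := ⟨_, rfl⟩
  obtain ⟨NN, hN⟩ := nums_of_pre hpre (by omega) hE hSE hCW hSC hSPb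
  have hbook := hpre.bookLive.where_ hsh.inv hsh.offText (by decide)
  simp only [Vorbis.Off.sizeof.Codebook] at hbook
  have hbook2 : (u.reg .rdi).toNat + 2120 ≤ (u.reg .rsp).toNat - 336 ∨ (u.reg .rsp).toNat + 8 ≤ (u.reg .rdi).toNat := by
    omega
  replace hbook : 1154368 ≤ (u.reg .rdi).toNat ∧ (u.reg .rdi).toNat + 2120 ≤ 12582912 := ⟨hbook.1, hbook.2.1⟩
  have hscw := hN.sc_where
  have hcww := hN.cw_where
  have hse1 := hN.se_pos
  have hse2 := hN.se_le
  have he24 := hN.e_lt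
  u_walk hcode [hμ.vendor] until [Vorbis.L.compute_sorted_huffman.loop1, Vorbis.L.compute_sorted_huffman.loop2] span [Vorbis.L.textLo, Vorbis.L.textHi] side (v_side)
  · -- 10b1ff: the check of `c->sparse`
    have hun : ShadowUntouched u.mem s_10b1ff.mem := by v_untouched
    exact book_check hpre hun _ 1 (by decide) (by decide)
  · -- the dense arm (10b2ae): `k = 0 ; i = 0`, then the head 10b21d of loop 1215 (stb_vorbis_fixed.c:1215)
    have hsp0 : SPb = 0 := by
      have : SPb < 256 := by
        rw [← hSPb]
        exact Mem.readLE_lt' _ _ 1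
      omega
    have hnn := hN.nn_dense hsp0
    have hcnt := hN.cnt hsp0
    have hlenw := hN.len_where
    obtain ⟨i, k, hi, hk, hile, hkc⟩ : ∃ i k : Nat, s_10b2ba.reg .r12 = UInt64.ofNat i ∧ s_10b2ba.reg .r14 = UInt64.ofNat k ∧
        i ≤ E ∧ k = longCount u.mem (u.reg .rsi).toNat i := ⟨0, 0, w_r12, w_r14, Nat.zero_le _, rfl⟩
    have hsame : Mem.SameExcept [⟨(u.reg .rsp).toNat - 336, (u.reg .rsp).toNat⟩, ⟨SC, SC + 4 * (SE + 1)⟩] u.mem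
        s_10b2ba.mem := by
      u_same
    have hun : ShadowUntouched u.mem s_10b2ba.mem := by v_untouched
    have hs0 : UInt64.ofNat (s_10b2ba.mem.readLE (u.reg .rsp) 8) = ret := by u_resolve
    have hs1 : UInt64.ofNat (s_10b2ba.mem.readLE (u.reg .rsp - 8) 8) = u.reg .r15 := by u_resolve
    have hs2 : UInt64.ofNat (s_10b2ba.mem.readLE (u.reg .rsp - 16) 8) = u.reg .r14 := by u_resolve
    have hs3 : UInt64.ofNat (s_10b2ba.mem.readLE (u.reg .rsp - 24) 8) = u.reg .r13 := by u_resolve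
    have hs4 : UInt64.ofNat (s_10b2ba.mem.readLE (u.reg .rsp - 32) 8) = u.reg .r12 := by u_resolve
    have hs5 : UInt64.ofNat (s_10b2ba.mem.readLE (u.reg .rsp - 40) 8) = u.reg .rbp := by u_resolve
    have hs6 : UInt64.ofNat (s_10b2ba.mem.readLE (u.reg .rsp - 48) 8) = u.reg .rbx := by u_resolve
    have hs7 : UInt64.ofNat (s_10b2ba.mem.readLE (u.reg .rsp - 88) 8) = u.reg .rsi := by u_resolve
    have hs8 : UInt64.ofNat (s_10b2ba.mem.readLE (u.reg .rsp - 72) 8) = u.reg .rdx := by u_resolve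
    have hdf : s_10b2ba.flags .df = false := by
      rw [w_flags]
      simp only [X86.User.df_setStatus]
      exact w_df_10b1ff
    have hmx : s_10b2ba.mxcsr &&& 8064 = 8064 := by
      rw [w_mxcsr]
      exact he_mx
    replace w_kept := w_kept.mono_all (S' := [.rbx, .r12, .r13, .r14, .r15, .rbp, .rsp, .rdi, .rax, .rcx, .rdx, .rsi, .r8, .r9, .r10, .r11,
      .r16, .r17, .r18, .r19, .r20, .r21, .r22, .r23, .r24, .r25, .r26, .r27, .r28, .r29, .r30, .r31]) (by rfl)
    clear w_mem w_flags w_mxcsr w_r12 w_r14 w_rdi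
    try clear w_zmm
    -- 10b21d, the loop head: measure `entries − i`
    u_loop [i, k] (fun v => E - (v.reg .r12).toNat)
    have r1 : s_10b2ba.mem.readLE (u.reg .rdi + 4) 4 = E := by
      rw [read_book hsame hbook.2 (by omega) hN.sc_book _ _ (by decide)]
      exact hE
    have hi31 : i < 2 ^ 31 := by omega
    have ea0 := idx1 i (u.reg .rsi) hi31 (by omega)
    obtain ⟨B, rb⟩ : ∃ B : Nat, s_10b2ba.mem.readLE
        (u.reg .rsi + Word.ofBV (BitVec.signExtend 64 (Word.part .w32 (UInt64.ofNat i)))) 1 = B := ⟨_, rfl⟩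
    u_walk hcode [hμ.vendor] until [Vorbis.L.compute_sorted_huffman.loop1, Vorbis.L.compute_sorted_huffman.cut6] span [Vorbis.L.textLo, Vorbis.L.textHi] side (v_side)
    · -- 10b221: the check of `c->entries`
      have hun' : ShadowUntouched u.mem s_10b221.mem := by v_untouched
      exact book_check hpre hun' _ 4 (by decide) (by decide)
    · -- 10b23f: the check of `lengths[i]`
      have hun' : ShadowUntouched u.mem s_10b23f.mem := by v_untouched
      have hlt : i < E := by
        rw [part32_ofNat i hi31, bv32_toInt E (by omega)] at hbr_10b22a
        omega
      refine hN.len_live.accSmall hsh.inv hun' _ 1 (by decide) ?_ ?_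
      · rw [ea0]
        omega
      · rw [ea0]
        omega
    · -- 10b24c: the call of include_in_sort
      v_inv
    · refine ⟨?_, ?_⟩
      · refine hsh.callee ?_ ?_ ?_ ?_
        · v_untouched
        · rw [w_rsp]
          u_omega
        · rw [w_rsp]
          u_omega
        · rw [w_rsp]
          u_omega
      · rw [w_rdi]
        exact hpre.bookLive
    · -- 10b324: the exit (`i ≥ c->entries`)
      refine ReachVia.done (Or.inl ⟨w_rip, ?_⟩)
      have hx := common_exit (v := s_10b22a) he0 hpre (by omega)
      rw [hN.sc, hN.se, Int.toNat_natCast] at hx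
      refine hx ?_ w_rsp ?_ ?_ ?_ ?_ ?_ ?_ ?_ w_eq ?_ ?_ w_rbp ?_ ?_
      · u_same
      · u_resolve
      · u_resolve
      · u_resolve
      · u_resolve
      · u_resolve
      · u_resolve
      · u_resolve
      · refine Vorbis.abiInv_of ?_ ?_
        · rw [w_flags]
          simp only [X86.User.df_setStatus]
          exact w_df_10b221
        · rw [w_mxcsr]
          exact hmx
      · v_untouched
      · u_resolve
      · u_resolve
    · -- 10b251: include_in_sort returned
      have hlt : i < E := by
        rw [part32_ofNat i hi31, bv32_toInt E (by omega)] at hbr_10b22a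
        omega
      have hpost := w_post
      v_after_call w_rsp_10b24c w_mem_10b24c
      have hs0r : UInt64.ofNat (s_10b24cr.mem.readLE (u.reg .rsp) 8) = ret := by u_frame hs0
      have hs1r : UInt64.ofNat (s_10b24cr.mem.readLE (u.reg .rsp - 8) 8) = u.reg .r15 := by u_frame hs1
      have hs2r : UInt64.ofNat (s_10b24cr.mem.readLE (u.reg .rsp - 16) 8) = u.reg .r14 := by u_frame hs2
      have hs3r : UInt64.ofNat (s_10b24cr.mem.readLE (u.reg .rsp - 24) 8) = u.reg .r13 := by u_frame hs3
      have hs4r : UInt64.ofNat (s_10b24cr.mem.readLE (u.reg .rsp - 32) 8) = u.reg .r12 := by u_frame hs4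
      have hs5r : UInt64.ofNat (s_10b24cr.mem.readLE (u.reg .rsp - 40) 8) = u.reg .rbp := by u_frame hs5
      have hs6r : UInt64.ofNat (s_10b24cr.mem.readLE (u.reg .rsp - 48) 8) = u.reg .rbx := by u_frame hs6
      have hs7r : UInt64.ofNat (s_10b24cr.mem.readLE (u.reg .rsp - 88) 8) = u.reg .rsi := by u_frame hs7
      have hs8r : UInt64.ofNat (s_10b24cr.mem.readLE (u.reg .rsp - 72) 8) = u.reg .rdx := by u_frame hs8
      have hsamer : Mem.SameExcept [⟨(u.reg .rsp).toNat - 336, (u.reg .rsp).toNat⟩, ⟨SC, SC + 4 * (SE + 1)⟩] u.mem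
          s_10b24cr.mem := by
        u_same
      have hunr : ShadowUntouched u.mem s_10b24cr.mem := by v_untouched
      -- the byte `lengths[i]`, the sparse byte, the result of include_in_sort
      have hB : B = u.mem.u8 ((u.reg .rsi).toNat + i) := by
        rw [← rb]
        exact read_len hsame hlenw.2.1 (by omega) hN.len_sc _ i ea0 hlt
      have hBlt : B < 256 := by
        rw [hB]
        exact Mem.u8_lt _ _
      have hsb : s_10b24c.mem.readLE (u.reg .rdi + 27) 1 = 0 := by
        have h24 : Mem.SameExcept [⟨(u.reg .rsp).toNat - 336, (u.reg .rsp).toNat⟩, ⟨SC, SC + 4 * (SE + 1)⟩] u.mem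
            s_10b24c.mem := by
          rw [w_mem_10b24c]
          u_same
        rw [read_book h24 hbook.2 (by omega) hN.sc_book _ _ (by decide), hSPb]
        exact hsp0
      have hrax : s_10b24cr.reg .rax = includeInSort 0 B := by
        have := hpost.2
        rw [w_rdi_10b24c, hsb, w_rsi_10b24c, byte_arg B hBlt] at this
        exact this
      have r2 : s_10b24cr.mem.readLE (u.reg .rdi + 40) 8 = CW := by
        rw [read_book hsamer hbook.2 (by omega) hN.sc_book _ _ (by decide)]
        exact hCW
      have r3 : s_10b24cr.mem.readLE (u.reg .rdi + 2096) 8 = SC := by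
        rw [read_book hsamer hbook.2 (by omega) hN.sc_book _ _ (by decide)]
        exact hSC
      clear w_same hpost w_post
      have e1 : (UInt64.ofNat (i + 1)).toNat = i + 1 := by
        rw [UInt64.toNat_ofNat']
        omega
      have e0 : (UInt64.ofNat i).toNat = i := by
        rw [UInt64.toNat_ofNat']
        omega
      have w_rax := hrax
      clear hrax
      have hkle : k ≤ i := by
        rw [hkc]
        exact longCount_le _ _ _
      have hk31 : k < 2 ^ 31 := by omega
      have ea2 := idx4 k SC hk31 (by omega)
      have ea1 := idx4 i CW hi31 (by omega)
      u_walk hcode [hμ.vendor] until [Vorbis.L.compute_sorted_huffman.loop1, Vorbis.L.compute_sorted_huffman.cut6] span [Vorbis.L.textLo, Vorbis.L.textHi] side (v_side)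
      · -- 10b259: the check of `c->codewords`
        have hun' : ShadowUntouched u.mem s_10b259.mem := by v_untouched
        exact book_check hpre hun' _ 8 (by decide) (by decide)
      · -- 10b269: the check of `c->codewords[i]`
        have hun' : ShadowUntouched u.mem s_10b269.mem := by v_untouched
        refine hN.cw_live.accSmall hsh.inv hun' _ 4 (by decide) ?_ ?_
        · rw [ea1]
          omega
        · rw [ea1, hnn]
          omega
      · -- 10b278: the check of `c->sorted_codewords`
        have hun' : ShadowUntouched u.mem s_10b278.mem := by v_untouched
        exact book_check hpre hun' _ 8 (by decide) (by decide)
      · -- 10b292: the call of bit_reverse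
        v_inv
      · show ShadowPre others frames s_10b292
        refine hsh.callee ?_ ?_ ?_ ?_
        · v_untouched
        · rw [w_rsp]
          u_omega
        · rw [w_rsp]
          u_omega
        · rw [w_rsp]
          u_omega
      · -- 10b219: entry `i` is not included; the back edge
        have hinc := not_include_of_eq B hbr_10b253
        u_loop_back [i + 1, k]
        · rw [w_r12]
          exact counter_inc32 i hi31
        · omega
        · -- `lengths[i]` does not count: the count below `i + 1` is the count below `i`
          have hshort : ¬ (11 ≤ u.mem.u8 ((u.reg .rsi).toNat + i) ∧ u.mem.u8 ((u.reg .rsi).toNat + i) ≤ 254) := by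
            rw [← hB]
            omega
          rw [longCount_succ_short hshort]
          exact hkc
        · rw [w_flags]
          simp only [X86.User.df_setStatus]
          exact w_df
        · rw [w_mxcsr]
          exact w_mx
        · rw [w_r12, counter_inc32 i hi31, e1, e0]
          omega
      · -- 10b297: entry `i` is included; bit_reverse returned; it touched no memory
        have hinc := include_of_ne B hbr_10b253
        have hk1 : k < SE := by
          rw [hkc, ← hcnt]
          refine longCount_lt hlt ?_
          rw [← hB]
          omega
        v_after_call w_rsp_10b292 w_mem_10b292
        have w_mem := w_mem_10b292
        rw [← show s_10b292r.mem = s_10b292.mem from w_post] at w_mem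
        obtain ⟨z, w_rax⟩ : ∃ z, s_10b292r.reg .rax = z := ⟨_, rfl⟩
        u_walk hcode [hμ.vendor] until [Vorbis.L.compute_sorted_huffman.loop1, Vorbis.L.compute_sorted_huffman.cut6] span [Vorbis.L.textLo, Vorbis.L.textHi] side (v_side)
        · -- 10b29d: the check of the store `c->sorted_codewords[k] = …`
          have hun' : ShadowUntouched u.mem s_10b29d.mem := by v_untouched
          refine hN.sc_live.accSmall hsh.inv hun' _ 4 (by decide) ?_ ?_
          · rw [ea2]
            omega
          · rw [ea2]
            omega
        · -- the back edge
          u_loop_back [i + 1, k + 1]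
          · rw [w_r12]
            exact counter_inc32 i hi31
          · rw [w_r14]
            exact lea32_inc k hk31
          · omega
          · -- `lengths[i]` counts: the count below `i + 1` is `k + 1`
            have hlong : 11 ≤ u.mem.u8 ((u.reg .rsi).toNat + i) ∧ u.mem.u8 ((u.reg .rsi).toNat + i) ≤ 254 := by
              rw [← hB]
              omega
            rw [longCount_succ_long hlong, ← hkc]
          · v_untouched
          · rw [w_flags]
            simp only [X86.User.df_setStatus]
            exact w_df_10b29d
          · rw [w_mxcsr]
            exact w_mx
          · rw [w_r12, counter_inc32 i hi31, e1, e0]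
            omega
  · -- the sparse arm (10b20e): `i = 0`, then the head 10b30f of loop 1220 (stb_vorbis_fixed.c:1220)
    obtain ⟨i, hi, hile⟩ : ∃ i : Nat, s_10b214.reg .r12 = UInt64.ofNat i ∧ i ≤ SE := ⟨0, w_r12, Nat.zero_le _⟩
    have hsame : Mem.SameExcept [⟨(u.reg .rsp).toNat - 336, (u.reg .rsp).toNat⟩, ⟨SC, SC + 4 * (SE + 1)⟩] u.mem
        s_10b214.mem := by
      u_same
    have hun : ShadowUntouched u.mem s_10b214.mem := by v_untouched
    have hs0 : UInt64.ofNat (s_10b214.mem.readLE (u.reg .rsp) 8) = ret := by u_resolve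
    have hs1 : UInt64.ofNat (s_10b214.mem.readLE (u.reg .rsp - 8) 8) = u.reg .r15 := by u_resolve
    have hs2 : UInt64.ofNat (s_10b214.mem.readLE (u.reg .rsp - 16) 8) = u.reg .r14 := by u_resolve
    have hs3 : UInt64.ofNat (s_10b214.mem.readLE (u.reg .rsp - 24) 8) = u.reg .r13 := by u_resolve
    have hs4 : UInt64.ofNat (s_10b214.mem.readLE (u.reg .rsp - 32) 8) = u.reg .r12 := by u_resolve
    have hs5 : UInt64.ofNat (s_10b214.mem.readLE (u.reg .rsp - 40) 8) = u.reg .rbp := by u_resolve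
    have hs6 : UInt64.ofNat (s_10b214.mem.readLE (u.reg .rsp - 48) 8) = u.reg .rbx := by u_resolve
    have hs7 : UInt64.ofNat (s_10b214.mem.readLE (u.reg .rsp - 88) 8) = u.reg .rsi := by u_resolve
    have hs8 : UInt64.ofNat (s_10b214.mem.readLE (u.reg .rsp - 72) 8) = u.reg .rdx := by u_resolve
    have hdf : s_10b214.flags .df = false := by
      rw [w_flags]
      simp only [X86.User.df_setStatus]
      exact w_df_10b1ff
    have hmx : s_10b214.mxcsr &&& 8064 = 8064 := by
      rw [w_mxcsr]
      exact he_mx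
    replace w_kept := w_kept.mono_all (S' := [.rbx, .r12, .r13, .r14, .r15, .rbp, .rsp, .rdi, .rax, .rcx, .rdx, .rsi, .r8, .r9, .r10, .r11,
      .r16, .r17, .r18, .r19, .r20, .r21, .r22, .r23, .r24, .r25, .r26, .r27, .r28, .r29, .r30, .r31]) (by rfl)
    clear w_mem w_flags w_mxcsr w_r12 w_rdi
    try clear w_zmm
    -- 10b30f, the loop head: measure `sorted_entries − i`
    u_loop [i] (fun v => SE - (v.reg .r12).toNat)
    have r1 : s_10b214.mem.readLE (u.reg .rdi + 2112) 4 = SE := by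
      rw [read_book hsame hbook.2 (by omega) hN.sc_book _ _ (by decide)]
      exact hSE
    have r2 : s_10b214.mem.readLE (u.reg .rdi + 40) 8 = CW := by
      rw [read_book hsame hbook.2 (by omega) hN.sc_book _ _ (by decide)]
      exact hCW
    have r3 : s_10b214.mem.readLE (u.reg .rdi + 2096) 8 = SC := by
      rw [read_book hsame hbook.2 (by omega) hN.sc_book _ _ (by decide)]
      exact hSC
    have hi31 : i < 2 ^ 31 := by omega
    have ea1 := idx4 i CW hi31 (by omega)
    have ea2 := idx4 i SC hi31 (by omega)
    have hnn := hN.nn_sparse (by omega)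
    u_walk hcode [hμ.vendor] until [Vorbis.L.compute_sorted_huffman.loop2, Vorbis.L.compute_sorted_huffman.cut6] span [Vorbis.L.textLo, Vorbis.L.textHi] side (v_side)
    · -- 10b316: the check of `c->sorted_entries`
      have hun' : ShadowUntouched u.mem s_10b316.mem := by v_untouched
      exact book_check hpre hun' _ 4 (by decide) (by decide)
    · -- 10b2c3: the check of `c->codewords`
      have hun' : ShadowUntouched u.mem s_10b2c3.mem := by v_untouched
      exact book_check hpre hun' _ 8 (by decide) (by decide)
    · -- 10b2d9: the check of `c->codewords[i]`
      have hun' : ShadowUntouched u.mem s_10b2d9.mem := by v_untouched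
      have hlt : i < SE := by
        rw [part32_ofNat i hi31, bv32_toInt SE (by omega)] at hbr_10b322
        omega
      refine hN.cw_live.accSmall hsh.inv hun' _ 4 (by decide) ?_ ?_
      · rw [ea1]
        omega
      · rw [ea1, hnn]
        omega
    · -- 10b2e9: the check of `c->sorted_codewords`
      have hun' : ShadowUntouched u.mem s_10b2e9.mem := by v_untouched
      exact book_check hpre hun' _ 8 (by decide) (by decide)
    · -- 10b2f8: the call of bit_reverse
      v_inv
    · show ShadowPre others frames s_10b2f8
      refine hsh.callee ?_ ?_ ?_ ?_
      · v_untouched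
      · rw [w_rsp]
        u_omega
      · rw [w_rsp]
        u_omega
      · rw [w_rsp]
        u_omega
    · -- 10b2fd: bit_reverse returned; it touched no memory
      v_after_call w_rsp_10b2f8 w_mem_10b2f8
      have w_mem : s_10b2f8r.mem = s_10b214.mem.writeLE (u.reg .rsp - 112) 8 1094397 := by
        rw [show s_10b2f8r.mem = s_10b2f8.mem from w_post, w_mem_10b2f8]
      have hlt : i < SE := by
        rw [part32_ofNat i hi31, bv32_toInt SE (by omega)] at hbr_10b322
        omega
      obtain ⟨z, w_rax⟩ : ∃ z, s_10b2f8r.reg .rax = z := ⟨_, rfl⟩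
      u_walk hcode [hμ.vendor] until [Vorbis.L.compute_sorted_huffman.loop2, Vorbis.L.compute_sorted_huffman.cut6] span [Vorbis.L.textLo, Vorbis.L.textHi] side (v_side)
      · -- 10b303: the check of the store `c->sorted_codewords[i] = …`
        have hun' : ShadowUntouched u.mem s_10b303.mem := by v_untouched
        refine hN.sc_live.accSmall hsh.inv hun' _ 4 (by decide) ?_ ?_
        · rw [ea2]
          omega
        · rw [ea2]
          omega
      · -- 10b30b → 10b30f: the back edge
        have e1 : (UInt64.ofNat (i + 1)).toNat = i + 1 := by
          rw [UInt64.toNat_ofNat']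
          omega
        have e0 : (UInt64.ofNat i).toNat = i := by
          rw [UInt64.toNat_ofNat']
          omega
        u_loop_back [i + 1]
        · rw [w_r12]
          exact counter_inc32 i hi31
        · omega
        · v_untouched
        · rw [w_flags]
          simp only [X86.User.df_setStatus]
          exact w_df_10b303
        · rw [w_mxcsr]
          exact w_mx
        · rw [w_r12, counter_inc32 i hi31, e1, e0]
          omega
    · -- 10b324: the exit
      refine ReachVia.done (Or.inl ⟨w_rip, ?_⟩)
      have hx := common_exit (v := s_10b322) he0 hpre (by omega)
      rw [hN.sc, hN.se, Int.toNat_natCast] at hx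
      refine hx ?_ w_rsp ?_ ?_ ?_ ?_ ?_ ?_ ?_ w_eq ?_ ?_ w_rbp ?_ ?_
      · u_same
      · u_resolve
      · u_resolve
      · u_resolve
      · u_resolve
      · u_resolve
      · u_resolve
      · u_resolve
      · refine Vorbis.abiInv_of ?_ ?_
        · rw [w_flags]
          simp only [X86.User.df_setStatus]
          exact w_df_10b316
        · rw [w_mxcsr]
          exact hmx
      · v_untouched
      · u_resolve
      · u_resolve
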